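-- pv_equiv track=rewrite | github.com/koudougoulaurent/appli_KBIS | core/security_monitoring.py | calculate_security_score
-- ===== SOURCE A (Python) =====
-- def calculate_security_score(alerts):
--     """Calculer un score de sécurité (0-100)"""
--     if not alerts:
--         return 100
--
--     # Pénaliser selon le nombre et le type d'alertes
--     penalty = 0
--     for alert in alerts:
--         if alert['severity'] == 'HIGH':
--             penalty += 20
--         elif alert['severity'] == 'MEDIUM':
--             penalty += 10
--         else:
--             penalty += 5
--
--     score = max(0, 100 - penalty)
--     return score
-- ===== SOURCE B (Python) =====
-- _WEIGHT = {'HIGH': 20, 'MEDIUM': 10}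
--
--
-- def _drain(alerts, i, budget):
--     """Spend the budget alert by alert; stop as soon as it is exhausted."""
--     if budget <= 0 or i == len(alerts):
--         return max(0, budget)
--     return _drain(alerts, i + 1, budget - _WEIGHT.get(alerts[i]['severity'], 5))
--
--
-- def calculate_security_score(alerts):
--     """Budget-countdown recursion: every alert costs at least 5, so at most 20
--     alerts are ever inspected before the score bottoms out at 0."""
--     if not alerts:
--         return 100
--     return _drain(alerts, 0, 100)
-- ===== Notes on version B (the rewrite author's own statement) =====
-- stated objective: alternative
-- what changed: Replaces the full-pass penalty accumulator with a budget-countdown recursion that stops as soon as the remaining budget reaches 0, so at most 20 alerts are ever inspected (speed not measured, so not claimed).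
import Mathlib
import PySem

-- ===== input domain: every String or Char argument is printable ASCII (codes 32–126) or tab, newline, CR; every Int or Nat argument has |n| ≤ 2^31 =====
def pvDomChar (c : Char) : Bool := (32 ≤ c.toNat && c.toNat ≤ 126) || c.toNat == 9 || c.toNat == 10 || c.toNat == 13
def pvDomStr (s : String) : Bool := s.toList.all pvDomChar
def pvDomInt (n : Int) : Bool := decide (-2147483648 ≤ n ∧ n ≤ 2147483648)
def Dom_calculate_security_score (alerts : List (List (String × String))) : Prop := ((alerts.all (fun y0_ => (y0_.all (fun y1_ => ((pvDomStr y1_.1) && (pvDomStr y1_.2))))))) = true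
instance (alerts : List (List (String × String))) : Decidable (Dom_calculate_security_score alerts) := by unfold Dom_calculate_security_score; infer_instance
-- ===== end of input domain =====

-- B replaces A's full-pass penalty accumulator by a budget-countdown recursion that
-- stops as soon as the budget is exhausted (objective: alternative; at most 20 alerts are ever read).

-- alert['severity'] on an association list: first matching value (total under Pre_, which requires the key)
def sevOf (alert : List (String × String)) : String :=
  (((alert.find? (fun p => p.1 == "severity")).map (·.2)).getD "")

-- ===== PORT A =====
def calculate_security_score (alerts : List (List (String × String))) : Int :=
  if alerts = [] then 100
  else
    let penalty := alerts.foldl (fun acc alert =>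
      if sevOf alert = "HIGH" then acc + 20
      else if sevOf alert = "MEDIUM" then acc + 10
      else acc + 5) 0
    max 0 (100 - penalty)

-- ===== PORT B =====
-- _WEIGHT.get(sev, 5) : the literal two-entry dict of Source B
def weightOf (alert : List (String × String)) : Int :=
  PySem.Dict.getD (PySem.Dict.ofList [("HIGH", (20 : Int)), ("MEDIUM", 10)]) (sevOf alert) 5

-- _drain(alerts, i, budget): Python advances an index i over alerts; ported as the
-- obvious structural recursion on the remaining suffix alerts[i:], same state otherwise.
def drain (alerts : List (List (String × String))) (budget : Int) : Int :=
  if budget ≤ 0 then max 0 budget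
  else
    match alerts with
    | [] => max 0 budget
    | a :: t => drain t (budget - weightOf a)

def calculate_security_score_alt (alerts : List (List (String × String))) : Int :=
  if alerts = [] then 100
  else drain alerts 100

-- ===== PRECONDITION & SPEC =====
-- Pre_ excludes alerts lacking a 'severity' key, on which the Python A raises KeyError.
def Pre_calculate_security_score (alerts : List (List (String × String))) : Prop :=
  ∀ alert ∈ alerts, (alert.find? (fun p => p.1 == "severity")).isSome = true
instance (alerts : List (List (String × String))) : Decidable (Pre_calculate_security_score alerts) := by unfold Pre_calculate_security_score; infer_instance

def pvWitness_calculate_security_score : (List (List (String × String))) :=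
  [[("severity", "HIGH")], [("severity", "low"), ("id", "3")]]

def Spec_calculate_security_score (alerts : List (List (String × String))) (out : Int) : Prop := out = calculate_security_score_alt alerts
instance (alerts : List (List (String × String))) (out : Int) : Decidable (Spec_calculate_security_score alerts out) := by unfold Spec_calculate_security_score; infer_instance

-- ===== CLAIM (what is proved, stated in full; the proofs are below) =====
def Claim_equal_calculate_security_score : Prop := ∀ (alerts : List (List (String × String))), Dom_calculate_security_score alerts → Pre_calculate_security_score alerts → Spec_calculate_security_score alerts (calculate_security_score alerts)

-- ===== LEMMAS AND PROOFS =====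

lemma weightOf_eq (a : List (String × String)) :
    weightOf a = if sevOf a = "HIGH" then 20 else if sevOf a = "MEDIUM" then 10 else 5 := by
  unfold weightOf
  have hd : PySem.Dict.ofList [("HIGH", (20 : Int)), ("MEDIUM", 10)]
      = PySem.Dict.mk [("HIGH", 20), ("MEDIUM", 10)] := by rfl
  rw [hd]
  by_cases h1 : sevOf a = "HIGH"
  · simp [PySem.Dict.getD, PySem.Dict.get?, h1]
  · have n1 : ("HIGH" == sevOf a) = false := beq_eq_false_iff_ne.mpr (fun e => h1 e.symm)
    by_cases h2 : sevOf a = "MEDIUM"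
    · simp [PySem.Dict.getD, PySem.Dict.get?, h2]
    · have n2 : ("MEDIUM" == sevOf a) = false := beq_eq_false_iff_ne.mpr (fun e => h2 e.symm)
      simp [PySem.Dict.getD, PySem.Dict.get?, h1, h2, n1, n2]

lemma weightOf_pos (a : List (String × String)) : 0 < weightOf a := by
  rw [weightOf_eq]; split_ifs <;> norm_num

lemma wsum_nonneg (alerts : List (List (String × String))) :
    0 ≤ (alerts.map weightOf).sum := by
  induction alerts with
  | nil => simp
  | cons a t ih => simpa using add_nonneg (le_of_lt (weightOf_pos a)) ih

-- the early-exit recursion computes the same value as subtracting the full weight sum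
lemma drain_eq (alerts : List (List (String × String))) (budget : Int) :
    drain alerts budget = max 0 (budget - (alerts.map weightOf).sum) := by
  induction alerts generalizing budget with
  | nil => simp [drain]
  | cons a t ih =>
    unfold drain
    by_cases h : budget ≤ 0
    · have hw := weightOf_pos a
      have hs := wsum_nonneg t
      simp only [h, if_true, List.map_cons, List.sum_cons]
      omega
    · simp only [h, if_false, ih, List.map_cons, List.sum_cons]
      congr 1; ring

-- A's accumulator loop is the weight sum
lemma foldl_eq_wsum (alerts : List (List (String × String))) (acc : Int) :
    alerts.foldl (fun acc alert =>
      if sevOf alert = "HIGH" then acc + 20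
      else if sevOf alert = "MEDIUM" then acc + 10
      else acc + 5) acc = acc + (alerts.map weightOf).sum := by
  induction alerts generalizing acc with
  | nil => simp
  | cons a t ih =>
    simp only [List.foldl_cons, List.map_cons, List.sum_cons, ih, weightOf_eq]
    split_ifs <;> ring

-- ===== VERDICT (by name: the statement is the Claim_ definition above) =====
theorem calculate_security_score_spec : Claim_equal_calculate_security_score := by
  intro alerts _ _
  unfold Spec_calculate_security_score calculate_security_score calculate_security_score_alt
  by_cases h : alerts = []
  · simp [h]
  · simp only [h, if_false]
    rw [foldl_eq_wsum, drain_eq]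
    norm_num
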